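-- pv_equiv track=rewrite | github.com/Mehedi-Oz/Practice-Python | Data Structures and Algorithms/LEETCODE/1295. Find Numbers with Even Number of Digits.py | counting_digits
-- ===== SOURCE A (Python) =====
-- def total_even_numbers(count):
--
--     if count % 2 == 0:
--         return 1
--
--     return 0
--
-- def counting_digits(number):
--     count = 0
--
--     if number < 0:
--         number = number * -1
--
--     if number == 0:
--         return 0
--     else:
--         while number > 0:
--             count += 1
--             number = number // 10
--
--     return total_even_numbers(count)
-- ===== SOURCE B (Python) =====
-- def counting_digits(number):
--     digit_count = len(str(abs(number)))
--     return 1 if digit_count % 2 == 0 else 0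
-- ===== Notes on version B (the rewrite author's own statement) =====
-- stated objective: idiomatic
-- what changed: Replaces the repeated floor-division counting loop (plus parity helper) with a direct digit count via len(str(abs(number))) and an inline parity expression.
import Mathlib
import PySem

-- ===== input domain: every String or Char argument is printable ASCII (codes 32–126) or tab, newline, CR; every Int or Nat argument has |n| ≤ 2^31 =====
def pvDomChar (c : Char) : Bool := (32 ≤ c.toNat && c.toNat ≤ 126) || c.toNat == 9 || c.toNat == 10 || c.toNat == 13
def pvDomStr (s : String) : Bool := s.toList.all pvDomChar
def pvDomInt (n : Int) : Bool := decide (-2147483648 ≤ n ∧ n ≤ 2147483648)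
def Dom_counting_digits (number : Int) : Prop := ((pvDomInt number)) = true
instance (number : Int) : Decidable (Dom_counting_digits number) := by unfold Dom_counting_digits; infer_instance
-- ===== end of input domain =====

-- B replaces A's repeated floor-division counting loop with a direct digit count via
-- len(str(abs(number))) and an inline parity expression (idiomatic; no speed claim).

-- ===== PORT A =====
def total_even_numbers (count : Int) : Int :=
  if PySem.Int.mod count 2 = 0 then 1 else 0

-- the 'while number > 0: count += 1; number = number // 10' loop of A
def pvLoopA (number : Int) (count : Int) : Int :=
  if h : number > 0 then pvLoopA (PySem.Int.floordiv number 10) (count + 1) else count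
termination_by number.toNat
decreasing_by
  simp only [PySem.Int.floordiv]
  rw [Int.fdiv_eq_ediv]
  simp only [show (0:Int) ≤ 10 by omega, true_or, if_pos]
  omega

def counting_digits (number : Int) : Int :=
  let number := if number < 0 then number * (-1) else number
  if number = 0 then 0
  else total_even_numbers (pvLoopA number 0)

-- ===== PORT B =====
def counting_digits_alt (number : Int) : Int :=
  let digit_count : Int := PySem.Str.len (PySem.Int.toStr |number|)
  if PySem.Int.mod digit_count 2 = 0 then 1 else 0

-- ===== PRECONDITION & SPEC =====
def Spec_counting_digits (number : Int) (out : Int) : Prop := out = counting_digits_alt number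
instance (number : Int) (out : Int) : Decidable (Spec_counting_digits number out) := by unfold Spec_counting_digits; infer_instance

-- ===== CLAIM (what is proved, stated in full; the proofs are below) =====
def Claim_equal_counting_digits : Prop := ∀ (number : Int), Dom_counting_digits number → Spec_counting_digits number (counting_digits number)

-- ===== LEMMAS AND PROOFS =====

-- number of base-10 digits of a natural number, the common reference of both ports
def pvDCount (n : Nat) : Nat :=
  if h : n < 10 then 1 else pvDCount (n / 10) + 1
decreasing_by omega

lemma pvDCount_lt (n : Nat) (h : n < 10) : pvDCount n = 1 := by
  unfold pvDCount; simp [h]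

lemma pvDCount_ge (n : Nat) (h : ¬ n < 10) : pvDCount n = pvDCount (n / 10) + 1 := by
  conv_lhs => unfold pvDCount
  simp [h]

-- Nat.toDigitsCore length = pvDCount (with enough fuel)
lemma pvToDigitsCore_len : ∀ (f n : Nat) (l : List Char), n < f →
    (Nat.toDigitsCore 10 f n l).length = pvDCount n + l.length := by
  intro f
  induction f with
  | zero => intro n l h; omega
  | succ f ih =>
    intro n l h
    simp only [Nat.toDigitsCore]
    by_cases h10 : n / 10 = 0
    · have : n < 10 := by omega
      simp [h10, pvDCount_lt n this]
      omega
    · have hn : ¬ n < 10 := by omega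
      rw [if_neg h10, ih (n / 10) _ (by omega), pvDCount_ge n hn]
      simp
      omega

lemma pvToDigits_len (n : Nat) : (Nat.toDigits 10 n).length = pvDCount n := by
  have := pvToDigitsCore_len (n + 1) n [] (by omega)
  simpa [Nat.toDigits] using this

-- A's loop counts exactly pvDCount digits for positive inputs
lemma pvLoopA_eq : ∀ (n : Nat), 0 < n → ∀ (c : Int), pvLoopA (n : Int) c = c + pvDCount n := by
  intro n
  induction n using Nat.strong_induction_on with
  | _ n ih =>
    intro hn c
    rw [pvLoopA]
    have hpos : (n : Int) > 0 := by exact_mod_cast hn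
    rw [dif_pos hpos]
    have hfd : PySem.Int.floordiv (n : Int) 10 = ((n / 10 : Nat) : Int) := by
      simp only [PySem.Int.floordiv]
      rw [Int.fdiv_eq_ediv]
      simp only [show (0:Int) ≤ 10 by omega, true_or, if_pos]
      omega
    rw [hfd]
    by_cases h10 : n < 10
    · have : n / 10 = 0 := by omega
      rw [this]
      rw [pvLoopA]
      simp [pvDCount_lt n h10]
    · rw [ih (n / 10) (by omega) (by omega) (c + 1), pvDCount_ge n h10]
      push_cast
      ring

-- toChars of a nonnegative cast is Nat.toDigits
lemma pvToChars_cast (n : Nat) : PySem.Int.toChars (n : Int) = Nat.toDigits 10 n := by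
  simp [PySem.Int.toChars]

-- B at a nonnegative cast, expressed through pvDCount
lemma pvAlt_eq (n : Nat) (hn : |(n : Int)| = (n : Int)) :
    counting_digits_alt (n : Int) =
      (if PySem.Int.mod ((pvDCount n : Nat) : Int) 2 = 0 then 1 else 0) := by
  simp only [counting_digits_alt, hn, PySem.Str.len, PySem.Int.toList_toStr]
  rw [pvToChars_cast, pvToDigits_len]

lemma pvMain (n : Nat) : counting_digits (n : Int) = counting_digits_alt (n : Int) := by
  have habs : |(n : Int)| = (n : Int) := abs_of_nonneg (by positivity)
  rw [pvAlt_eq n habs]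
  simp only [counting_digits]
  have hlt : ¬ ((n : Int) < 0) := by omega
  rw [if_neg hlt]
  by_cases h0 : (n : Int) = 0
  · have : n = 0 := by exact_mod_cast h0
    subst this
    norm_num [pvDCount_lt 0 (by omega), PySem.Int.mod, Int.fmod]
  · have hn : 0 < n := by omega
    rw [if_neg h0, total_even_numbers, pvLoopA_eq n hn 0]
    norm_num

-- ===== VERDICT (by name: the statement is the Claim_ definition above) =====
theorem counting_digits_spec : Claim_equal_counting_digits := by
  intro number _
  unfold Spec_counting_digits
  rcases lt_or_ge number 0 with h | h
  case inr =>
    obtain ⟨n, rfl⟩ := Int.eq_ofNat_of_zero_le h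
    exact pvMain n
  case inl =>
    have h1 : counting_digits number = counting_digits (number.natAbs : Int) := by
      simp only [counting_digits]
      rw [if_pos h, if_neg (by omega : ¬ ((number.natAbs : Int) < 0))]
      have : number * (-1) = (number.natAbs : Int) := by
        rw [Int.natCast_natAbs, abs_of_neg h]; ring
      rw [this]
    have h2 : counting_digits_alt number = counting_digits_alt (number.natAbs : Int) := by
      simp only [counting_digits_alt]
      have : |number| = |(number.natAbs : Int)| := by
        rw [Int.abs_natCast, Int.natCast_natAbs]
      rw [this]
    rw [h1, h2]
    exact pvMain number.natAbs
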